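-- pv_equiv track=rewrite | github.com/sbneo2022/osmosispy | osmosispy/utils.py | _count_diff_hashable
-- ===== SOURCE A (Python) =====
-- import collections
--
-- _Mismatch = collections.namedtuple("Mismatch", "actual expected value")
--
-- def _count_diff_hashable(actual, expected):
--     "Returns list of (cnt_act, cnt_exp, elem) triples where the counts differ"
--     # elements must be hashable
--     s, t = collections.Counter(actual), collections.Counter(expected)
--     result = []
--     for elem, cnt_s in s.items():
--         cnt_t = t.get(elem, 0)
--         if cnt_s != cnt_t:
--             diff = _Mismatch(cnt_s, cnt_t, elem)
--             result.append(diff)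
--     for elem, cnt_t in t.items():
--         if elem not in s:
--             diff = _Mismatch(0, cnt_t, elem)
--             result.append(diff)
--     return result
-- ===== SOURCE B (Python) =====
-- import collections
--
-- _Mismatch = collections.namedtuple("Mismatch", "actual expected value")
--
-- def _count_diff_hashable(actual, expected):
--     "Returns list of (cnt_act, cnt_exp, elem) triples where the counts differ"
--     # One merged map elem -> (cnt_act, cnt_exp), built directly from the two
--     # sequences (no Counter); dict insertion order gives actual's keys first
--     # in first-occurrence order, then expected-only keys, which is exactly
--     # the order A emits.
--     counts = {}
--     for x in actual:
--         a, b = counts.get(x, (0, 0))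
--         counts[x] = (a + 1, b)
--     for x in expected:
--         a, b = counts.get(x, (0, 0))
--         counts[x] = (a, b + 1)
--     return [_Mismatch(a, b, k) for k, (a, b) in counts.items() if a != b]
-- ===== Notes on version B (the rewrite author's own statement) =====
-- stated objective: alternative
-- what changed: A builds two separate Counters and emits mismatches in two passes (s's items, then t's items filtered by membership in s); B builds one merged dict mapping each element to its pair of counts directly from the two input lists (no Counter, no membership test) and emits the result in a single comprehension over that map.
import Mathlib
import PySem

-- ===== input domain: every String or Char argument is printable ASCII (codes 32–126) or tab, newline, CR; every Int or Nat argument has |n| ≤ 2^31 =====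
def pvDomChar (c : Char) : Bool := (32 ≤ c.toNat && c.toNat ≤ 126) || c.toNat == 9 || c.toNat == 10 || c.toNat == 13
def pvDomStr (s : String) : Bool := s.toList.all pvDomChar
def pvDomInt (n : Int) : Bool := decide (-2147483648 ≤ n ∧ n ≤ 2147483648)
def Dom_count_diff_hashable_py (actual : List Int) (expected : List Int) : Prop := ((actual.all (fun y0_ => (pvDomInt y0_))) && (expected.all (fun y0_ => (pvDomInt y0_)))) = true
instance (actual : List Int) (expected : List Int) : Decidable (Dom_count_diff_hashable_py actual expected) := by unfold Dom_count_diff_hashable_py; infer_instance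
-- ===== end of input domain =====

-- B replaces A's two Counters and two emitting passes by ONE merged dict elem -> (cnt_act, cnt_exp) built directly from both lists, emitted in a single pass; same result, same cost (alternative decomposition).

-- ===== PORT A =====
def count_diff_hashable_py (actual : List Int) (expected : List Int) : List (Int × Int × Int) :=
  let s := PySem.Dict.counter actual
  let t := PySem.Dict.counter expected
  let result := s.items.foldl (fun res p =>
    let cnt_t := t.getD p.1 0
    if p.2 ≠ cnt_t then res ++ [(p.2, cnt_t, p.1)] else res) []
  t.items.foldl (fun res p =>
    if ¬ (s.contains p.1 = true) then res ++ [((0 : Int), p.2, p.1)] else res) result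

-- ===== PORT B =====
def count_diff_hashable_py_alt (actual : List Int) (expected : List Int) : List (Int × Int × Int) :=
  let counts1 : PySem.Dict Int (Int × Int) := actual.foldl (fun d x =>
    let p := d.getD x ((0 : Int), (0 : Int))
    d.insert x (p.1 + 1, p.2)) PySem.Dict.empty
  let counts : PySem.Dict Int (Int × Int) := expected.foldl (fun d x =>
    let p := d.getD x ((0 : Int), (0 : Int))
    d.insert x (p.1, p.2 + 1)) counts1
  (counts.items.filter (fun kp => kp.2.1 ≠ kp.2.2)).map (fun kp => (kp.2.1, kp.2.2, kp.1))

-- ===== PRECONDITION & SPEC =====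
def Spec_count_diff_hashable_py (actual : List Int) (expected : List Int) (out : List (Int × Int × Int)) : Prop := out = count_diff_hashable_py_alt actual expected
instance (actual : List Int) (expected : List Int) (out : List (Int × Int × Int)) : Decidable (Spec_count_diff_hashable_py actual expected out) := by unfold Spec_count_diff_hashable_py; infer_instance

-- ===== CLAIM (what is proved, stated in full; the proofs are below) =====
def Claim_equal_count_diff_hashable_py : Prop := ∀ (actual : List Int) (expected : List Int), Dom_count_diff_hashable_py actual expected → Spec_count_diff_hashable_py actual expected (count_diff_hashable_py actual expected)

-- ===== LEMMAS AND PROOFS =====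

-- count-pair invariant of B's first loop
theorem cdh_getD_fold1 (l : List Int) (d : PySem.Dict Int (Int × Int)) (k : Int) :
    (l.foldl (fun d x =>
      let p := d.getD x ((0 : Int), (0 : Int))
      d.insert x (p.1 + 1, p.2)) d).getD k ((0 : Int), (0 : Int))
      = ((d.getD k ((0 : Int), (0 : Int))).1 + l.count k, (d.getD k ((0 : Int), (0 : Int))).2) := by
  induction l generalizing d with
  | nil => simp
  | cons x xs ih =>
    simp only [List.foldl_cons, ih, PySem.Dict.getD_insert, List.count_cons]
    by_cases h : k = x
    · subst h; simp; ring
    · simp [h, Ne.symm h]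

-- count-pair invariant of B's second loop
theorem cdh_getD_fold2 (l : List Int) (d : PySem.Dict Int (Int × Int)) (k : Int) :
    (l.foldl (fun d x =>
      let p := d.getD x ((0 : Int), (0 : Int))
      d.insert x (p.1, p.2 + 1)) d).getD k ((0 : Int), (0 : Int))
      = ((d.getD k ((0 : Int), (0 : Int))).1, (d.getD k ((0 : Int), (0 : Int))).2 + l.count k) := by
  induction l generalizing d with
  | nil => simp
  | cons x xs ih =>
    simp only [List.foldl_cons, ih, PySem.Dict.getD_insert, List.count_cons]
    by_cases h : k = x
    · subst h; simp; ring
    · simp [h, Ne.symm h]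

theorem cdh_fm_congr {α β : Type} {p q : α → Bool} {f g : α → β} {l : List α}
    (h : ∀ x ∈ l, p x = q x ∧ (q x = true → f x = g x)) :
    (l.filter p).map f = (l.filter q).map g := by
  induction l with
  | nil => rfl
  | cons x xs ih =>
    obtain ⟨h1, h2⟩ := h x (by simp)
    have ih' := ih (fun y hy => h y (by simp [hy]))
    by_cases hq : q x = true
    · simp [h1, hq, h2 hq, ih']
    · simp only [Bool.not_eq_true] at hq
      simp [h1, hq, ih']

theorem cdh_main (actual expected : List Int) :
    count_diff_hashable_py actual expected = count_diff_hashable_py_alt actual expected := by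
  unfold count_diff_hashable_py count_diff_hashable_py_alt
  simp only []
  -- characterize B's merged dict
  set F1 : PySem.Dict Int (Int × Int) → Int → PySem.Dict Int (Int × Int) :=
    fun d x => d.insert x ((d.getD x ((0:Int),(0:Int))).1 + 1, (d.getD x ((0:Int),(0:Int))).2) with hF1
  set F2 : PySem.Dict Int (Int × Int) → Int → PySem.Dict Int (Int × Int) :=
    fun d x => d.insert x ((d.getD x ((0:Int),(0:Int))).1, (d.getD x ((0:Int),(0:Int))).2 + 1) with hF2
  have hnd1 : (actual.foldl F1 PySem.Dict.empty).keys.Nodup :=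
    PySem.Dict.nodup_keys_foldl_insert actual _ _ (by simp)
  have hnd : ((expected.foldl F2 (actual.foldl F1 PySem.Dict.empty))).keys.Nodup :=
    PySem.Dict.nodup_keys_foldl_insert expected _ _ hnd1
  have hkeys : ((expected.foldl F2 (actual.foldl F1 PySem.Dict.empty))).keys
      = PySem.Set.update (PySem.Set.ofList actual) expected := by
    rw [PySem.Dict.keys_foldl_insert, PySem.Dict.keys_foldl_insert]
    simp [PySem.Set.update_nil_left]
  have hgetD : ∀ k, ((expected.foldl F2 (actual.foldl F1 PySem.Dict.empty))).getD k ((0:Int),(0:Int))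
      = ((actual.count k : Int), (expected.count k : Int)) := by
    intro k
    rw [show (expected.foldl F2 (actual.foldl F1 PySem.Dict.empty)) =
        (expected.foldl (fun d x =>
          let p := d.getD x ((0 : Int), (0 : Int))
          d.insert x (p.1, p.2 + 1)) (actual.foldl (fun d x =>
          let p := d.getD x ((0 : Int), (0 : Int))
          d.insert x (p.1 + 1, p.2)) PySem.Dict.empty)) from rfl]
    rw [cdh_getD_fold2, cdh_getD_fold1]
    simp
  have hitems := PySem.Dict.items_eq_map_keys _ hnd ((0:Int),(0:Int))
  rw [hitems, hkeys]
  -- A's two loops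
  rw [PySem.List.foldl_append_ite (p := fun p : Int × Int => p.2 ≠ (PySem.Dict.counter expected).getD p.1 0)
        (f := fun p => (p.2, (PySem.Dict.counter expected).getD p.1 0, p.1)),
      PySem.List.foldl_append_ite (p := fun p : Int × Int => ¬ ((PySem.Dict.counter actual).contains p.1 = true))
        (f := fun p => ((0 : Int), p.2, p.1))]
  rw [PySem.Set.update_eq_append_filter]
  simp only [PySem.Dict.items_counter, List.map_append, List.filter_map, List.map_map,
    List.filter_append, List.map_append, List.nil_append]
  congr 1
  · apply cdh_fm_congr
    intro x hx
    simp [Function.comp, PySem.Dict.getD_counter, hgetD x]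
  · rw [List.filter_filter]
    apply cdh_fm_congr
    intro x hx
    have hxe : x ∈ expected := (PySem.Set.mem_ofList _ _).1 hx
    have hce : expected.count x ≠ 0 := fun h0 => List.count_eq_zero.1 h0 hxe
    by_cases hxa : x ∈ actual
    · simp [Function.comp, PySem.Dict.contains_counter, hxa,
        PySem.Set.mem_ofList, hgetD x]
    · have hca : actual.count x = 0 := List.count_eq_zero.2 hxa
      simp [Function.comp, PySem.Dict.contains_counter,
        PySem.Set.mem_ofList, hxa, hca, hgetD x]
      exact fun h => hce (by exact_mod_cast h.symm)

-- ===== VERDICT (by name: the statement is the Claim_ definition above) =====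
theorem count_diff_hashable_py_spec : Claim_equal_count_diff_hashable_py := by
  intro a e _
  exact cdh_main a e
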